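-- pv_equiv track=rewrite | github.com/gridvisi/Python_workspace | Zero 2 Hero Class/String_space/6 kyu Frog jumping.py | solution
-- ===== SOURCE A (Python) =====
-- def solution(a):
--     pos = 0
--     jumps = 0
--     for i in range(len(a)):
--         pos += a[pos]
--         jumps += 1
--         if pos >= len(a) or pos < 0:
--             return jumps
--     return -1
-- ===== SOURCE B (Python) =====
-- def solution(a):
--     n = len(a)
--     pos = 0
--     jumps = 0
--     seen = set()
--     while 0 <= pos < n and pos not in seen:
--         seen.add(pos)
--         pos += a[pos]
--         jumps += 1
--         if pos >= n or pos < 0: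
--             return jumps
--     return -1
-- ===== Notes on version B (the rewrite author's own statement) =====
-- stated objective: alternative
-- what changed: B replaces A's fixed n-iteration fuel loop with explicit cycle detection: a seen-set of visited positions, looping while the position is fresh and in range, returning -1 as soon as a position repeats (pigeonhole makes this equivalent to A's bounded simulation).
import Mathlib
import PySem

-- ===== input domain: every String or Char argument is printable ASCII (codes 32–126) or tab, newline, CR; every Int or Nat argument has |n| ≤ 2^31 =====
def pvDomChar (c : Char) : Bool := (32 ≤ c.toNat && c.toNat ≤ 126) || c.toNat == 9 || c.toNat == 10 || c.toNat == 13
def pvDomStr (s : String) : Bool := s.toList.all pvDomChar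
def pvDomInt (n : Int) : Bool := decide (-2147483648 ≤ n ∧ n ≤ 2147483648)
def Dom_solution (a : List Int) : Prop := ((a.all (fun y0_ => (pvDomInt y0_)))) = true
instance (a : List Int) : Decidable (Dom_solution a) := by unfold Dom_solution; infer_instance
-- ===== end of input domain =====

-- B replaces A's fixed n-iteration fuel loop with a seen-set cycle-detection loop; same value everywhere.

-- ===== PORT A =====
-- 'for i in range(len(a))' with early return: fuel-counted recursion over the same state (pos, jumps).
def solutionLoopA (a : List Int) : Nat → Int → Int → Int
  | 0, _, _ => -1
  | fuel + 1, pos, jumps =>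
    let pos' := pos + (PySem.List.pyGet? a pos).getD 0   -- a[pos]; always in range on executed paths
    let jumps' := jumps + 1
    if (a.length : Int) ≤ pos' ∨ pos' < 0 then jumps'
    else solutionLoopA a fuel pos' jumps'

def solution (a : List Int) : Int := solutionLoopA a a.length 0 0

-- ===== PORT B =====
-- 'while 0 <= pos < n and pos not in seen': the seen set is a list of distinct visited positions.
def solutionLoopB (a : List Int) (pos jumps : Int) (seen : List Int) : Int :=
  if h : (0 ≤ pos ∧ pos < (a.length : Int)) ∧ pos ∉ seen then
    let pos' := pos + (PySem.List.pyGet? a pos).getD 0   -- a[pos]; guard guarantees in range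
    let jumps' := jumps + 1
    if (a.length : Int) ≤ pos' ∨ pos' < 0 then jumps'
    else solutionLoopB a pos' jumps' (pos :: seen)
  else -1
termination_by ((Finset.Ico (0 : Int) (a.length : Int)).filter (fun x => x ∉ seen)).card
decreasing_by
  apply Finset.card_lt_card
  constructor
  · intro x hx
    simp only [Finset.mem_filter, List.mem_cons] at hx ⊢
    exact ⟨hx.1, fun hm => hx.2 (Or.inr hm)⟩
  · intro hsub
    have := hsub (by simp [Finset.mem_filter, Finset.mem_Ico, h.1.1, h.1.2, h.2] : pos ∈ (Finset.Ico (0 : Int) (a.length : Int)).filter (fun x => x ∉ seen))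
    simp at this

def solution_alt (a : List Int) : Int := solutionLoopB a 0 0 []

-- ===== PRECONDITION & SPEC =====
def Spec_solution (a : List Int) (out : Int) : Prop := out = solution_alt a
instance (a : List Int) (out : Int) : Decidable (Spec_solution a out) := by unfold Spec_solution; infer_instance

-- ===== CLAIM (what is proved, stated in full; the proofs are below) =====
def Claim_equal_solution : Prop := ∀ (a : List Int), Dom_solution a → Spec_solution a (solution a)

-- ===== LEMMAS AND PROOFS =====

-- the one-jump step function
def pvStep (a : List Int) (x : Int) : Int := x + (PySem.List.pyGet? a x).getD 0

-- If the trajectory is trapped in a step-closed set of in-range positions, A's loop never escapes.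
lemma loopA_trapped (a : List Int) (S : List Int)
    (hcl : ∀ x ∈ S, 0 ≤ pvStep a x ∧ pvStep a x < (a.length : Int) ∧ pvStep a x ∈ S) :
    ∀ fuel pos jumps, pos ∈ S → solutionLoopA a fuel pos jumps = -1 := by
  intro fuel
  induction fuel with
  | zero => intro pos jumps _; rfl
  | succ f ih =>
    intro pos jumps hpos
    obtain ⟨h0, h1, h2⟩ := hcl pos hpos
    simp only [solutionLoopA]
    rw [if_neg (by push Not; exact ⟨by simpa [pvStep] using h1, by simpa [pvStep] using h0⟩)]
    exact ih _ _ h2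

-- distinct in-range positions: at most a.length of them
lemma seen_length_le (n : Nat) (l : List Int) (hnd : l.Nodup)
    (hmem : ∀ x ∈ l, 0 ≤ x ∧ x < (n : Int)) : l.length ≤ n := by
  have hsub : l.toFinset ⊆ Finset.Ico (0 : Int) (n : Int) := by
    intro x hx
    rw [List.mem_toFinset] at hx
    simpa [Finset.mem_Ico] using hmem x hx
  have := Finset.card_le_card hsub
  rw [List.toFinset_card_of_nodup hnd, Int.card_Ico] at this
  omega

-- Main invariant lemma: A's fuel loop and B's seen loop agree along the common trajectory.
lemma loop_agree (a : List Int) : ∀ (fuel : Nat) (seen : List Int) (pos jumps : Int),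
    seen.Nodup →
    (∀ x ∈ seen, 0 ≤ x ∧ x < (a.length : Int)) →
    (0 ≤ pos ∧ pos < (a.length : Int)) →
    (∀ x ∈ seen, 0 ≤ pvStep a x ∧ pvStep a x < (a.length : Int) ∧ pvStep a x ∈ pos :: seen) →
    seen.length + fuel = a.length →
    solutionLoopA a fuel pos jumps = solutionLoopB a pos jumps seen := by
  intro fuel
  induction fuel with
  | zero =>
    intro seen pos jumps hnd hrange hpos hcl hlen
    by_cases hmem : pos ∈ seen
    · rw [solutionLoopB, dif_neg (by simp [hmem])]
      rfl
    · exfalso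
      have : (pos :: seen).length ≤ a.length :=
        seen_length_le a.length (pos :: seen) (List.nodup_cons.mpr ⟨hmem, hnd⟩)
          (by intro x hx; rcases List.mem_cons.mp hx with h | h
              · subst h; exact hpos
              · exact hrange x h)
      simp only [List.length_cons] at this
      omega
  | succ f ih =>
    intro seen pos jumps hnd hrange hpos hcl hlen
    by_cases hmem : pos ∈ seen
    · rw [solutionLoopB, dif_neg (by simp [hmem])]
      -- seen is step-closed (the frontier pos is itself in seen): A is trapped
      apply loopA_trapped a seen
      · intro x hx
        obtain ⟨h0, h1, h2⟩ := hcl x hx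
        refine ⟨h0, h1, ?_⟩
        rcases List.mem_cons.mp h2 with h | h
        · rw [h]; exact hmem
        · exact h
      · exact hmem
    · rw [solutionLoopB, dif_pos ⟨hpos, hmem⟩]
      simp only [solutionLoopA]
      by_cases hout : (a.length : Int) ≤ pos + (PySem.List.pyGet? a pos).getD 0 ∨
          pos + (PySem.List.pyGet? a pos).getD 0 < 0
      · rw [if_pos hout, if_pos hout]
      · rw [if_neg hout, if_neg hout]
        push Not at hout
        apply ih (pos :: seen)
        · exact List.nodup_cons.mpr ⟨hmem, hnd⟩
        · intro x hx
          rcases List.mem_cons.mp hx with h | h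
          · subst h; exact hpos
          · exact hrange x h
        · exact ⟨hout.2, hout.1⟩
        · intro x hx
          rcases List.mem_cons.mp hx with h | h
          · subst h
            exact ⟨hout.2, hout.1, List.mem_cons_self⟩
          · obtain ⟨h0, h1, h2⟩ := hcl x h
            exact ⟨h0, h1, List.mem_cons.mpr (Or.inr h2)⟩
        · simp only [List.length_cons]; omega

-- ===== VERDICT (by name: the statement is the Claim_ definition above) =====
theorem solution_spec : Claim_equal_solution := by
  intro a _
  unfold Spec_solution solution solution_alt
  rcases Nat.eq_zero_or_pos a.length with h0 | hpos
  · rw [h0]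
    rw [solutionLoopB, dif_neg (by simp [h0])]
    rfl
  · exact loop_agree a a.length [] 0 0 List.nodup_nil (by simp)
      ⟨le_refl 0, by exact_mod_cast hpos⟩ (by simp) (by simp)
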